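-- pv_equiv track=rewrite | github.com/DivOnYT/HashDiv | Main_Code/HashDiv.py | convFr2Gr
-- ===== SOURCE A (Python) =====
-- def convFr2Gr(ch):
-- 	nouvC = ""
-- 	for car in ch:
-- 		code = ord(car)
-- 		if (code == 65) or (code == 97):
-- 			code = 945
-- 		elif (code == 66) or (code == 98):
-- 			code = 946
-- 		elif (code == 67) or (code == 99):
-- 			code = 947
-- 		elif (code == 68) or (code == 100):
-- 			code = 948
-- 		elif (code == 69) or (code == 101):
-- 			code = 949
-- 		elif (code == 70) or (code == 102):
-- 			code = 950
-- 		elif (code == 71) or (code == 103):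
-- 			code = 951
-- 		elif (code == 72) or (code == 104):
-- 			code = 952
-- 		elif (code == 73) or (code == 105):
-- 			code = 953
-- 		elif (code == 74) or (code == 106):
-- 			code = 954
-- 		elif (code == 75) or (code == 107):
-- 			code = 955
-- 		elif (code == 76) or (code == 108):
-- 			code = 956
-- 		elif (code == 77) or (code == 109):
-- 			code = 957
-- 		elif (code == 78) or (code == 110):
-- 			code = 958
-- 		elif (code == 79) or (code == 111):
-- 			code = 959
-- 		elif (code == 80) or (code == 112):
-- 			code = 960
-- 		elif (code == 81) or (code == 113):
-- 			code = 961
-- 		elif (code == 82) or (code == 114):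
-- 			code = 962
-- 		elif (code == 83) or (code == 115):
-- 			code = 963
-- 		elif (code == 84) or (code == 116):
-- 			code = 964
-- 		elif (code == 85) or (code == 117):
-- 			code = 965
-- 		elif (code == 86) or (code == 118):
-- 			code = 966
-- 		elif (code == 87) or (code == 119):
-- 			code = 967
-- 		elif (code == 88) or (code == 120):
-- 			code = 968
-- 		elif (code == 89) or (code == 121):
-- 			code = 969
-- 		elif (code == 90) or (code == 122):
-- 			code = 970
-- 		nouvC = nouvC + chr(code)
-- 	return nouvC
-- ===== SOURCE B (Python) =====
-- _GREEK = "".join(chr(945 + i) for i in range(26))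
-- _TABLE = str.maketrans("ABCDEFGHIJKLMNOPQRSTUVWXYZabcdefghijklmnopqrstuvwxyz", _GREEK * 2)
--
-- def convFr2Gr(ch):
-- 	return ch.translate(_TABLE)
-- ===== Notes on version B (the rewrite author's own statement) =====
-- stated objective: idiomatic
-- what changed: Replaces the per-character 26-branch if/elif chain and repeated string concatenation with a translation table built once (str.maketrans mapping both cases of each Latin letter to its Greek code point) and a single str.translate call, with no explicit loop or branching in the function.
import Mathlib
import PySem

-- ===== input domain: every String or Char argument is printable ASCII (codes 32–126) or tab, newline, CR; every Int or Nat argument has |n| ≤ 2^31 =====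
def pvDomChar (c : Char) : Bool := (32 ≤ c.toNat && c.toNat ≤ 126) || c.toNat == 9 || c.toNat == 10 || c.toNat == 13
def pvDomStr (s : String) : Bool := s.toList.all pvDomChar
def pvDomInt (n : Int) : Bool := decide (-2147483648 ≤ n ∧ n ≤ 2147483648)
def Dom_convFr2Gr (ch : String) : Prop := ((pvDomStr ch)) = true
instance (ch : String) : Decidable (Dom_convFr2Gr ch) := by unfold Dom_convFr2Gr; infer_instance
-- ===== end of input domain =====

-- B replaces A's per-character 26-branch equality chain with a translation table built
-- once (latin code -> greek code, as str.maketrans/str.translate) and a lookup per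
-- character; objective: idiomatic. Proved equal on the ASCII domain.


-- ===== PORT A =====
-- A's per-character 26-branch chain (ord → new code), transcribed branch by branch
def convFr2GrCode (code : Nat) : Nat :=
  if code = 65 ∨ code = 97 then 945
  else if code = 66 ∨ code = 98 then 946
  else if code = 67 ∨ code = 99 then 947
  else if code = 68 ∨ code = 100 then 948
  else if code = 69 ∨ code = 101 then 949
  else if code = 70 ∨ code = 102 then 950
  else if code = 71 ∨ code = 103 then 951
  else if code = 72 ∨ code = 104 then 952
  else if code = 73 ∨ code = 105 then 953
  else if code = 74 ∨ code = 106 then 954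
  else if code = 75 ∨ code = 107 then 955
  else if code = 76 ∨ code = 108 then 956
  else if code = 77 ∨ code = 109 then 957
  else if code = 78 ∨ code = 110 then 958
  else if code = 79 ∨ code = 111 then 959
  else if code = 80 ∨ code = 112 then 960
  else if code = 81 ∨ code = 113 then 961
  else if code = 82 ∨ code = 114 then 962
  else if code = 83 ∨ code = 115 then 963
  else if code = 84 ∨ code = 116 then 964
  else if code = 85 ∨ code = 117 then 965
  else if code = 86 ∨ code = 118 then 966
  else if code = 87 ∨ code = 119 then 967
  else if code = 88 ∨ code = 120 then 968
  else if code = 89 ∨ code = 121 then 969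
  else if code = 90 ∨ code = 122 then 970
  else code

def convFr2Gr (ch : String) : String :=
  ch.toList.foldl
    (fun nouvC car => nouvC ++ (Char.ofNat (convFr2GrCode car.toNat)).toString) ""

-- ===== PORT B =====
-- _GREEK = "".join(chr(945+i) for i in range(26))
def convFr2GrGreek : List Nat := (List.range 26).map (fun i => 945 + i)

-- _TABLE = str.maketrans("ABC…xyz", _GREEK * 2)  — a code→code translation table
def convFr2GrTable : PySem.Dict Nat Nat :=
  PySem.Dict.ofList
    (("ABCDEFGHIJKLMNOPQRSTUVWXYZabcdefghijklmnopqrstuvwxyz".toList.map Char.toNat).zip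
      (convFr2GrGreek ++ convFr2GrGreek))

-- ch.translate(_TABLE): look each character up in the table, keep it if absent
def convFr2Gr_alt (ch : String) : String :=
  String.join (ch.toList.map (fun c => (Char.ofNat (convFr2GrTable.getD c.toNat c.toNat)).toString))

-- ===== PRECONDITION & SPEC =====
def Spec_convFr2Gr (ch : String) (out : String) : Prop := out = convFr2Gr_alt ch
instance (ch : String) (out : String) : Decidable (Spec_convFr2Gr ch out) := by unfold Spec_convFr2Gr; infer_instance

-- ===== CLAIM (what is proved, stated in full; the proofs are below) =====
def Claim_equal_convFr2Gr : Prop := ∀ (ch : String), Dom_convFr2Gr ch → Spec_convFr2Gr ch (convFr2Gr ch)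

-- ===== LEMMAS AND PROOFS =====
set_option maxRecDepth 8192 in
theorem convFr2Gr_code_eq_small :
    ∀ c : Fin 128, convFr2GrCode c.val = convFr2GrTable.getD c.val c.val := by
  decide

theorem convFr2Gr_char_eq (c : Char) (h : pvDomChar c = true) :
    convFr2GrCode c.toNat = convFr2GrTable.getD c.toNat c.toNat := by
  have hlt : c.toNat < 128 := by
    unfold pvDomChar at h
    simp only [Bool.or_eq_true, Bool.and_eq_true, decide_eq_true_eq, beq_iff_eq] at h
    omega
  exact convFr2Gr_code_eq_small ⟨c.toNat, hlt⟩

theorem convFr2Gr_foldl_append (l : List String) (s : String) :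
    l.foldl (· ++ ·) s = s ++ l.foldl (· ++ ·) "" := by
  induction l generalizing s with
  | nil => simp
  | cons x t ih =>
    simp only [List.foldl_cons]
    rw [ih (s ++ x), ih ("" ++ x), String.append_assoc]
    simp

theorem convFr2Gr_join_cons (s : String) (l : List String) :
    String.join (s :: l) = s ++ String.join l := by
  simp only [String.join, List.foldl_cons]
  rw [convFr2Gr_foldl_append]
  simp

theorem convFr2Gr_join (l : List Char) (acc : String)
    (hdom : ∀ c ∈ l, pvDomChar c = true) :
    l.foldl (fun nouvC car => nouvC ++ (Char.ofNat (convFr2GrCode car.toNat)).toString) acc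
    = acc ++ String.join (l.map (fun car => (Char.ofNat (convFr2GrTable.getD car.toNat car.toNat)).toString)) := by
  induction l generalizing acc with
  | nil => simp [String.join]
  | cons c t ih =>
    simp only [List.foldl_cons, List.map_cons]
    rw [ih _ (fun x hx => hdom x (List.mem_cons_of_mem c hx)), convFr2Gr_join_cons,
        convFr2Gr_char_eq c (hdom c (List.mem_cons_self ..)), String.append_assoc]

-- ===== VERDICT (by name: the statement is the Claim_ definition above) =====
theorem convFr2Gr_spec : Claim_equal_convFr2Gr := by
  intro ch hdom
  unfold Spec_convFr2Gr convFr2Gr convFr2Gr_alt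
  have h : ∀ c ∈ ch.toList, pvDomChar c = true := by
    simpa [Dom_convFr2Gr, pvDomStr, List.all_eq_true] using hdom
  simpa using convFr2Gr_join ch.toList "" h
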